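-- pv_equiv track=rewrite | github.com/fbkarsdorp/dreams | metrics.py | margin
-- ===== SOURCE A (Python) =====
-- def margin(ranking, references):
--     """Return the margin, or absolute difference between the highest
--     irrelevant item and the lowest relevant one."""
--     lowest_relevant, highest_irrelevant = 0, 0
--     for k, prediction in enumerate(ranking, 1):
--         if prediction not in references and highest_irrelevant is 0:
--             highest_irrelevant = k
--         if prediction in references and k > lowest_relevant:
--             lowest_relevant = k
--     return abs(lowest_relevant - highest_irrelevant)
-- ===== SOURCE B (Python) =====
-- def margin(ranking, references):
--     """Return the margin, or absolute difference between the highest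
--     irrelevant item and the lowest relevant one."""
--     refs = set(references)
--     rel = [p in refs for p in ranking]
--     n = len(rel)
--     lead = 0                       # length of the fully-relevant prefix
--     while lead < n and rel[lead]:
--         lead += 1
--     first_irrelevant = 0 if lead == n else lead + 1
--     trail = n                      # strip the fully-irrelevant suffix
--     while trail > 0 and not rel[trail - 1]:
--         trail -= 1
--     return abs(trail - first_irrelevant)
-- ===== Notes on version B (the rewrite author's own statement) =====
-- stated objective: faster
-- what changed: B builds a hash set of references once and precomputes a boolean relevance mask, then derives the two ranks as boundary positions (length of the relevant prefix, end of the list minus the irrelevant suffix) instead of A's single forward loop with two rank accumulators and a repeated list membership test.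
import Mathlib
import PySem

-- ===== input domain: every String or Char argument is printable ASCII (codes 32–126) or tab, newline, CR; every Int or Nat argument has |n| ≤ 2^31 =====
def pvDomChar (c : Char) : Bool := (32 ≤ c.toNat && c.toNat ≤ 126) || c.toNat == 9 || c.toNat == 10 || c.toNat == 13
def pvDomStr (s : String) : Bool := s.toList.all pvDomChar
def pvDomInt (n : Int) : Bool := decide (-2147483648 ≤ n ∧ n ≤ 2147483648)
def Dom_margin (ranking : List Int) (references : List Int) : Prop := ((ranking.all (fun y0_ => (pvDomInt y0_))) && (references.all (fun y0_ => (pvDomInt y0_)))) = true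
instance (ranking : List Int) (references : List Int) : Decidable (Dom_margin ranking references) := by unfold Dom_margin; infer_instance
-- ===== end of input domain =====

-- B builds a set of references once and a boolean relevance mask, then reads the two ranks
-- off as boundary positions (relevant prefix length, list length minus irrelevant suffix);
-- objective: faster (one membership structure instead of a list scan per element).

-- ===== PORT A =====
-- the `for k, prediction in enumerate(ranking, 1)` loop with state (lowest_relevant, highest_irrelevant)
def marginLoop (references : List Int) : Int → Int × Int → List Int → Int × Int
  | _, s, [] => s
  | k, s, p :: rest =>
      let s1 := if ¬ references.contains p ∧ s.2 = 0 then (s.1, k) else s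
      let s2 := if references.contains p ∧ k > s1.1 then (k, s1.2) else s1
      marginLoop references (k + 1) s2 rest

def margin (ranking : List Int) (references : List Int) : Int :=
  let s := marginLoop references 1 (0, 0) ranking
  |s.1 - s.2|

-- ===== PORT B =====
-- `while lead < n and rel[lead]: lead += 1`  — length of the leading all-True prefix
def leadTrueCount : List Bool → Nat
  | [] => 0
  | b :: r => if b then leadTrueCount r + 1 else 0

-- `while trail > 0 and not rel[trail-1]: trail -= 1` — count of the trailing all-False suffix
def trailFalseCount (l : List Bool) : Nat :=
  leadTrueCount (l.reverse.map (fun b => !b))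

def margin_alt (ranking : List Int) (references : List Int) : Int :=
  let refs := PySem.Set.ofList references
  let rel := ranking.map (fun p => refs.contains p)
  let n := rel.length
  let lead := leadTrueCount rel
  let firstIrrelevant : Int := if lead = n then 0 else (lead : Int) + 1
  let trail : Int := (n : Int) - (trailFalseCount rel : Int)
  |trail - firstIrrelevant|

-- ===== PRECONDITION & SPEC =====
def Spec_margin (ranking : List Int) (references : List Int) (out : Int) : Prop := out = margin_alt ranking references
instance (ranking : List Int) (references : List Int) (out : Int) : Decidable (Spec_margin ranking references out) := by unfold Spec_margin; infer_instance

-- ===== CLAIM (what is proved, stated in full; the proofs are below) =====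
def Claim_equal_margin : Prop := ∀ (ranking : List Int) (references : List Int), Dom_margin ranking references → Spec_margin ranking references (margin ranking references)

-- ===== LEMMAS AND PROOFS =====

-- proof-side characterisation of A's loop: the two accumulators computed separately
def lastRelevant (references : List Int) : Int → Int → List Int → Int
  | _, m, [] => m
  | k, m, p :: rest =>
      lastRelevant references (k + 1) (if references.contains p then max m k else m) rest

def firstIrrelevant (references : List Int) : Int → List Int → Int
  | _, [] => 0
  | k, p :: rest => if ¬ references.contains p then k else firstIrrelevant references (k + 1) rest

theorem marginLoop_eq (references l : List Int) :
    ∀ (k a b : Int), 1 ≤ k →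
      marginLoop references k (a, b) l =
        (lastRelevant references k a l,
         if b = 0 then firstIrrelevant references k l else b) := by
  induction l with
  | nil => intro k a b hk; simp [marginLoop, lastRelevant, firstIrrelevant]
  | cons p rest ih =>
      intro k a b hk
      by_cases hc : p ∈ references
      · have hstep : marginLoop references k (a, b) (p :: rest) =
            marginLoop references (k + 1) (max a k, b) rest := by
          by_cases hka : a < k
          · simp [marginLoop, hc, hka, max_eq_right hka.le]
          · simp [marginLoop, hc, hka, max_eq_left (by omega : k ≤ a)]
        rw [hstep, ih (k + 1) (max a k) b (by omega)]
        simp [lastRelevant, firstIrrelevant, hc]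
      · by_cases hb : b = 0
        · have hk0 : k ≠ 0 := by omega
          have hstep : marginLoop references k (a, b) (p :: rest) =
              marginLoop references (k + 1) (a, k) rest := by
            simp [marginLoop, hc, hb]
          rw [hstep, ih (k + 1) a k (by omega)]
          simp [lastRelevant, firstIrrelevant, hc, hb, hk0]
        · have hstep : marginLoop references k (a, b) (p :: rest) =
              marginLoop references (k + 1) (a, b) rest := by
            simp [marginLoop, hc, hb]
          rw [hstep, ih (k + 1) a b (by omega)]
          simp [lastRelevant, hc, hb]

-- the relevance mask agrees with list membership
theorem mask_eq (references ranking : List Int) :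
    ranking.map (fun p => (PySem.Set.ofList references).contains p) =
      ranking.map (fun p => references.contains p) := by
  refine List.map_congr_left (fun p _ => ?_)
  simp [PySem.Set.contains]

-- firstIrrelevant read off the mask as the relevant-prefix length
theorem firstIrrelevant_eq (references l : List Int) :
    ∀ k : Int,
      firstIrrelevant references k l =
        (if leadTrueCount (l.map (fun p => references.contains p)) = l.length then 0
         else k + (leadTrueCount (l.map (fun p => references.contains p)) : Int)) := by
  induction l with
  | nil => intro k; simp [firstIrrelevant, leadTrueCount]
  | cons p rest ih =>
      intro k
      by_cases hc : p ∈ references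
      · have hlen : (leadTrueCount (rest.map (fun q => references.contains q)) : Int) ≤ rest.length := by
          have : ∀ m : List Bool, leadTrueCount m ≤ m.length := by
            intro m; induction m with
            | nil => simp [leadTrueCount]
            | cons b r ihm => by_cases hb : b = true <;> simp [leadTrueCount, hb] <;> omega
          exact_mod_cast (by simpa using this (rest.map (fun q => references.contains q)))
        rw [show firstIrrelevant references k (p :: rest) = firstIrrelevant references (k + 1) rest by
              simp [firstIrrelevant, hc], ih (k + 1)]
        simp only [List.map_cons, leadTrueCount, List.length_cons, hc, List.contains_eq_mem,
          decide_true, if_true]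
        push_cast
        split_ifs <;> omega
      · simp [firstIrrelevant, leadTrueCount, hc]

theorem lastRelevant_append (references l : List Int) (p : Int) :
    ∀ (k m : Int),
      lastRelevant references k m (l ++ [p]) =
        (if references.contains p
         then max (lastRelevant references k m l) (k + l.length)
         else lastRelevant references k m l) := by
  induction l with
  | nil => intro k m; by_cases hc : p ∈ references <;> simp [lastRelevant, hc]
  | cons q rest ih =>
      intro k m
      simp only [List.cons_append, lastRelevant, ih (k + 1)]
      by_cases hc : p ∈ references <;>
        simp [hc, List.length_cons]; ring_nf

-- trail boundary: lastRelevant from rank 1 is the length minus the irrelevant suffix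
theorem lastRelevant_eq (references : List Int) (l : List Int) :
    lastRelevant references 1 0 l =
      (l.length : Int) - (trailFalseCount (l.map (fun p => references.contains p)) : Int) := by
  induction l using List.reverseRecOn with
  | nil => simp [lastRelevant, trailFalseCount, leadTrueCount]
  | append_singleton rest p ih =>
      have htf : trailFalseCount ((rest ++ [p]).map (fun q => references.contains q)) =
          (if references.contains p then 0
           else trailFalseCount (rest.map (fun q => references.contains q)) + 1) := by
        by_cases hc : p ∈ references <;>
          simp [trailFalseCount, leadTrueCount, hc]
      have hbound : lastRelevant references 1 0 rest ≤ rest.length := by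
        rw [ih]
        omega
      rw [lastRelevant_append references rest p 1 0, htf]
      by_cases hc : p ∈ references
      · simp only [List.contains_eq_mem, hc, decide_true, if_true]
        rw [max_eq_right (by omega : lastRelevant references 1 0 rest ≤ 1 + (rest.length : Int))]
        simp only [List.length_append, List.length_cons, List.length_nil]
        push_cast
        omega
      · simp only [List.contains_eq_mem, hc, decide_false, if_false, Bool.false_eq_true]
        rw [ih]
        simp only [List.contains_eq_mem, List.length_append, List.length_cons, List.length_nil]
        push_cast
        omega

-- ===== VERDICT (by name: the statement is the Claim_ definition above) =====
theorem margin_spec : Claim_equal_margin := by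
  intro ranking references _
  unfold Spec_margin margin margin_alt
  simp only [marginLoop_eq references ranking 1 0 0 (by norm_num), mask_eq,
    firstIrrelevant_eq references ranking 1, lastRelevant_eq references ranking,
    List.contains_eq_mem, List.length_map]
  split_ifs <;> (try rfl) <;> (congr 1; ring)
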